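-- pv_equiv track=rewrite | github.com/allenwind/tf2bert | tf2bert/text/bmes.py | words2bmes
-- ===== SOURCE A (Python) =====
-- def words2bmes(words):
--     tags = []
--     for w in words:
--         if not w:
--             raise ValueError('{} contains None or zero-length word {}'.format(str(words), w))
--         if len(w) == 1:
--             tags.append('S')
--         else:
--             tags.extend(['B'] + ['M'] * (len(w) - 2) + ['E'])
--     return tags
-- ===== SOURCE B (Python) =====
-- def words2bmes(words):
--     # Two-stage boundary-set algorithm: first record word start/end positions
--     # over the flattened character sequence, then tag each position by membership.
--     starts = set()
--     ends = set()
--     total = 0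
--     for w in words:
--         if not w:
--             raise ValueError('{} contains None or zero-length word {}'.format(str(words), w))
--         starts.add(total)
--         total += len(w)
--         ends.add(total - 1)
--     tags = []
--     for i in range(total):
--         if i in starts:
--             tags.append('S' if i in ends else 'B')
--         elif i in ends:
--             tags.append('E')
--         else:
--             tags.append('M')
--     return tags
-- ===== Notes on version B (the rewrite author's own statement) =====
-- stated objective: alternative
-- what changed: B first computes the sets of word start and end positions over the flattened character sequence, then assigns each position's tag by boundary-set membership, instead of concatenating per-word B/M*/E tag lists.
import Mathlib
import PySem

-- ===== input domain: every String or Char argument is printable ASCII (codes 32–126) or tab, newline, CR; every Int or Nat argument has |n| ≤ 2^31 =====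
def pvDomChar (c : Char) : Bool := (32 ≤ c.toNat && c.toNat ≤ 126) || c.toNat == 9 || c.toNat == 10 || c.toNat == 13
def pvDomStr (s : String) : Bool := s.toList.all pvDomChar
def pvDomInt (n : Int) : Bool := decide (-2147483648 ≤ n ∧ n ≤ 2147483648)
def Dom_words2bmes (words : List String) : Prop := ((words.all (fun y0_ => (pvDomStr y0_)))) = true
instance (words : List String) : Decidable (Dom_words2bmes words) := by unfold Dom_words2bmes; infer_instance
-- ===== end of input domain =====

-- B replaces A's per-word concatenation of B/M*/E tag lists by a two-stage boundary-set
-- algorithm (record word start/end positions over the flattened text, then tag each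
-- position by set membership); same cost (objective: alternative).
-- On a zero-length word the Python raises ValueError (both A and B) — Pre_ excludes those inputs.

-- ===== PORT A =====
-- for w in words: if not w: raise (excluded by Pre_; the port then leaves tags unchanged);
-- if len(w)==1: tags.append('S') else tags.extend(['B']+['M']*(len(w)-2)+['E'])
def words2bmes (words : List String) : List String :=
  words.foldl (fun tags w =>
    if w.toList = [] then tags
    else if PySem.Str.len w == 1 then tags ++ ["S"]
    else tags ++ (["B"] ++ List.replicate (PySem.Str.len w - 2).toNat "M" ++ ["E"])) []

-- ===== PORT B =====
-- pass 1 loop body: if not w: raise (excluded by Pre_); starts.add(total); total += len(w); ends.add(total-1)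
-- acc = (total, starts, ends)
def bmesStep (acc : Int × PySem.Set Int × PySem.Set Int) (w : String) :
    Int × PySem.Set Int × PySem.Set Int :=
  if w.toList = [] then acc
  else (acc.1 + PySem.Str.len w, PySem.Set.add acc.2.1 acc.1,
        PySem.Set.add acc.2.2 (acc.1 + PySem.Str.len w - 1))

-- pass 2: for i in range(total): append tag decided by membership in starts/ends
def bmesScan (st : Int × PySem.Set Int × PySem.Set Int) : List String :=
  (PySem.List.pyRange 0 st.1 1).foldl (fun tags i =>
    tags ++ [if PySem.Set.contains st.2.1 i then
               (if PySem.Set.contains st.2.2 i then "S" else "B")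
             else if PySem.Set.contains st.2.2 i then "E" else "M"]) []

def words2bmes_alt (words : List String) : List String :=
  bmesScan (words.foldl bmesStep (0, PySem.Set.empty, PySem.Set.empty))

-- ===== PRECONDITION & SPEC =====
-- Pre_ excludes inputs containing a zero-length word, on which the Python A raises ValueError.
def Pre_words2bmes (words : List String) : Prop := ∀ w ∈ words, w.toList ≠ []
instance (words : List String) : Decidable (Pre_words2bmes words) := by unfold Pre_words2bmes; infer_instance
def pvWitness_words2bmes : List String := ["a", "ab", "abc"]
def Spec_words2bmes (words : List String) (out : List String) : Prop := out = words2bmes_alt words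
instance (words : List String) (out : List String) : Decidable (Spec_words2bmes words out) := by unfold Spec_words2bmes; infer_instance

-- ===== CLAIM (what is proved, stated in full; the proofs are below) =====
def Claim_equal_words2bmes : Prop := ∀ (words : List String), Dom_words2bmes words → Pre_words2bmes words → Spec_words2bmes words (words2bmes words)

-- ===== LEMMAS AND PROOFS =====

-- per-word tag list A builds (Str.len unfolded to list length)
def wordTag (w : String) : List String :=
  if (w.toList.length : Int) == 1 then ["S"]
  else ["B"] ++ List.replicate ((w.toList.length : Int) - 2).toNat "M" ++ ["E"]

def totLen : List String → Int
  | [] => 0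
  | w :: ws => (w.toList.length : Int) + totLen ws

def startsOf : Int → List String → List Int
  | _, [] => []
  | c, w :: ws => c :: startsOf (c + w.toList.length) ws

def endsOf : Int → List String → List Int
  | _, [] => []
  | c, w :: ws => (c + w.toList.length - 1) :: endsOf (c + w.toList.length) ws

lemma totLen_nonneg (ws : List String) : 0 ≤ totLen ws := by
  induction ws with
  | nil => simp [totLen]
  | cons w ws ih => simp only [totLen]; positivity

lemma startsOf_ge (c : Int) (ws : List String) : ∀ x ∈ startsOf c ws, c ≤ x := by
  induction ws generalizing c with
  | nil => simp [startsOf]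
  | cons w ws ih =>
    intro x hx
    simp only [startsOf, List.mem_cons] at hx
    rcases hx with rfl | hx
    · exact le_refl x
    · have := ih (c + w.toList.length) x hx; omega

lemma endsOf_ge (c : Int) (ws : List String) (h : ∀ w ∈ ws, w.toList ≠ []) :
    ∀ x ∈ endsOf c ws, c ≤ x := by
  induction ws generalizing c with
  | nil => simp [endsOf]
  | cons w ws ih =>
    intro x hx
    have hw : 1 ≤ w.toList.length := by
      have := h w (by simp)
      cases hl : w.toList with
      | nil => exact absurd hl this
      | cons a t => simp
    simp only [endsOf, List.mem_cons] at hx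
    rcases hx with rfl | hx
    · omega
    · have := ih (c + w.toList.length) (fun v hv => h v (List.mem_cons_of_mem _ hv)) x hx
      omega

-- pass 1 of B computes the total length and the boundary-position sets
lemma build (ws : List String) (h : ∀ w ∈ ws, w.toList ≠ [])
    (c : Int) (S E : PySem.Set Int)
    (hS : ∀ x ∈ S, x < c) (hE : ∀ x ∈ E, x < c) :
    ws.foldl bmesStep (c, S, E)
    = (c + totLen ws, S ++ startsOf c ws, E ++ endsOf c ws) := by
  induction ws generalizing c S E with
  | nil => simp [totLen, startsOf, endsOf]
  | cons w ws ih =>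
    have hne : w.toList ≠ [] := h w (by simp)
    have hw : 1 ≤ w.toList.length := by
      cases hl : w.toList with
      | nil => exact absurd hl hne
      | cons a t => simp
    have hlen : PySem.Str.len w = (w.toList.length : Int) := by
      simp [PySem.Str.len_eq]
    have hstep : bmesStep (c, S, E) w
        = (c + (w.toList.length : Int), S ++ [c], E ++ [c + w.toList.length - 1]) := by
      rw [bmesStep, if_neg hne]
      simp only [hlen]
      rw [PySem.Set.add_of_not_mem (x := c) (fun hc => absurd (hS c hc) (by omega)),
          PySem.Set.add_of_not_mem (x := c + (w.toList.length : Int) - 1)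
            (fun hc => absurd (hE _ hc) (by omega))]
    rw [List.foldl_cons, hstep,
        ih (fun v hv => h v (List.mem_cons_of_mem _ hv)) (c + w.toList.length) (S ++ [c])
          (E ++ [c + w.toList.length - 1])
          (by intro x hx; rcases List.mem_append.1 hx with hx | hx
              · have := hS x hx; omega
              · rw [List.mem_singleton] at hx; omega)
          (by intro x hx; rcases List.mem_append.1 hx with hx | hx
              · have := hE x hx; omega
              · rw [List.mem_singleton] at hx; omega)]
    refine Prod.ext ?_ (Prod.ext ?_ ?_)
    · show c + (w.toList.length : Int) + totLen ws = c + totLen (w :: ws)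
      simp only [totLen]; ring
    · show S ++ [c] ++ startsOf (c + w.toList.length) ws = S ++ startsOf c (w :: ws)
      simp [startsOf]
    · show E ++ [c + w.toList.length - 1] ++ endsOf (c + w.toList.length) ws
          = E ++ endsOf c (w :: ws)
      simp [endsOf]

-- index formula for A's per-word tag list
lemma wordTag_getElem (n k : Nat) (h2 : 2 ≤ n) (hk : k < n)
    (hk' : k < ("B" :: (List.replicate (n - 2) "M" ++ ["E"])).length) :
    ("B" :: (List.replicate (n - 2) "M" ++ ["E"]))[k]
    = if k = 0 then "B" else if k = n - 1 then "E" else "M" := by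
  cases k with
  | zero => simp
  | succ k =>
    simp only [List.getElem_cons_succ]
    have hkn : k < n - 1 := by
      simp at hk'; omega
    rw [List.getElem_append]
    split
    · next hlt =>
      simp only [List.getElem_replicate]
      simp only [List.length_replicate] at hlt
      rw [if_neg (by omega), if_neg (by omega)]
    · next hge =>
      simp only [List.length_replicate] at hge
      have : k + 1 = n - 1 := by omega
      rw [if_neg (by omega), if_pos this]
      simp

-- one word's block of positions, tagged by "is it c? is it c+n-1?", is A's per-word list
lemma block (n : Nat) (hn : 1 ≤ n) (c : Int) :
    (PySem.List.pyRange c (c + n) 1).map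
      (fun i => if i = c then (if i = c + n - 1 then "S" else "B")
                else if i = c + n - 1 then "E" else "M")
    = if (n : Int) == 1 then ["S"]
      else ["B"] ++ List.replicate ((n : Int) - 2).toNat "M" ++ ["E"] := by
  rw [PySem.List.pyRange_one]
  have harg : (c + n - c).toNat = n := by omega
  rw [harg]
  rcases Nat.lt_or_ge n 2 with h2 | h2
  · interval_cases n
    simp
  · have hne : ((n : Int) == 1) = false := by simp; omega
    rw [hne]
    simp only [Bool.false_eq_true, if_false]
    have htn : ((n : Int) - 2).toNat = n - 2 := by omega
    rw [htn, List.map_map]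
    have hform : ["B"] ++ List.replicate (n - 2) "M" ++ ["E"]
        = "B" :: (List.replicate (n - 2) "M" ++ ["E"]) := by simp
    rw [hform]
    apply List.ext_getElem
    · simp; omega
    · intro k hk hk'
      simp only [List.getElem_map, List.getElem_range, Function.comp_apply]
      have hklt : k < n := by simpa using hk
      have h1 : (c + (k : Int) = c) ↔ k = 0 := by omega
      have h2' : (c + (k : Int) = c + n - 1) ↔ k = n - 1 := by omega
      rw [wordTag_getElem n k h2 hklt hk']
      simp only [h1, h2']
      by_cases hk0 : k = 0
      · rw [if_pos hk0, if_pos hk0, if_neg (by omega)]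
      · rw [if_neg hk0, if_neg hk0]

-- pass 2 of B over the whole range, with membership tests against the final sets,
-- produces A's concatenation of per-word tag lists
lemma scan (ws : List String) (h : ∀ w ∈ ws, w.toList ≠ [])
    (c : Int) (S E : List Int)
    (hS : ∀ i, c ≤ i → (i ∈ S ↔ i ∈ startsOf c ws))
    (hE : ∀ i, c ≤ i → (i ∈ E ↔ i ∈ endsOf c ws)) :
    (PySem.List.pyRange c (c + totLen ws) 1).map
      (fun i => if PySem.Set.contains S i then
                  (if PySem.Set.contains E i then "S" else "B")
                else if PySem.Set.contains E i then "E" else "M")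
    = ws.flatMap wordTag := by
  induction ws generalizing c with
  | nil => simp [totLen, PySem.List.pyRange_one_eq_nil]
  | cons w ws ih =>
    have hne : w.toList ≠ [] := h w (by simp)
    have hw : 1 ≤ w.toList.length := by
      cases hl : w.toList with
      | nil => exact absurd hl hne
      | cons a t => simp
    have hrest : 0 ≤ totLen ws := totLen_nonneg ws
    have htot : totLen (w :: ws) = (w.toList.length : Int) + totLen ws := rfl
    have hsplit := PySem.List.pyRange_one_append c (c + w.toList.length)
      (c + totLen (w :: ws)) (by omega) (by rw [htot]; omega)
    rw [hsplit, List.map_append, List.flatMap_cons]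
    congr 1
    · -- the block of word w
      rw [List.map_congr_left (g := fun i =>
            if i = c then (if i = c + w.toList.length - 1 then "S" else "B")
            else if i = c + w.toList.length - 1 then "E" else "M")]
      · rw [block w.toList.length hw c]
        simp [wordTag]
      · intro i hi
        rw [PySem.List.mem_pyRange_one] at hi
        have hiS : i ∈ S ↔ i = c := by
          rw [hS i hi.1]
          simp only [startsOf, List.mem_cons]
          constructor
          · rintro (rfl | hx)
            · rfl
            · have := startsOf_ge (c + w.toList.length) ws i hx; omega
          · intro hx; exact Or.inl hx
        have hiE : i ∈ E ↔ i = c + w.toList.length - 1 := by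
          rw [hE i hi.1]
          simp only [endsOf, List.mem_cons]
          constructor
          · rintro (rfl | hx)
            · rfl
            · have := endsOf_ge (c + w.toList.length) ws
                (fun v hv => h v (List.mem_cons_of_mem _ hv)) i hx
              omega
          · intro hx; exact Or.inl hx
        simp only [PySem.Set.contains_iff, hiS, hiE]
    · -- the remaining words
      rw [htot, show c + ((w.toList.length : Int) + totLen ws)
            = (c + w.toList.length) + totLen ws by ring]
      apply ih (fun v hv => h v (List.mem_cons_of_mem _ hv))
      · intro i hi
        rw [hS i (by omega)]
        simp only [startsOf, List.mem_cons]
        constructor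
        · rintro (rfl | hx)
          · omega
          · exact hx
        · intro hx; exact Or.inr hx
      · intro i hi
        rw [hE i (by omega)]
        simp only [endsOf, List.mem_cons]
        constructor
        · rintro (rfl | hx)
          · omega
          · exact hx
        · intro hx; exact Or.inr hx

-- A's fold, on nonempty words, is a flat concatenation of per-word tag lists
lemma A_flat (words : List String) (h : ∀ w ∈ words, w.toList ≠ []) :
    words2bmes words = words.flatMap wordTag := by
  unfold words2bmes
  rw [PySem.List.foldl_congr_mem words _ (fun tags w => tags ++ wordTag w) []
      (by intro tags w hw
          have hne : w.toList ≠ [] := h w hw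
          simp only [hne, if_false, wordTag, PySem.Str.len_eq]
          split <;> rfl)]
  rw [PySem.List.foldl_append_eq_flatMap]
  simp

-- ===== VERDICT (by name: the statement is the Claim_ definition above) =====
theorem words2bmes_spec : Claim_equal_words2bmes := by
  intro words _ hpre
  unfold Spec_words2bmes words2bmes_alt
  rw [build words hpre 0 PySem.Set.empty PySem.Set.empty (by simp [PySem.Set.empty])
        (by simp [PySem.Set.empty])]
  unfold bmesScan
  rw [PySem.List.foldl_append_singleton_eq_map]
  simp only [PySem.Set.empty, List.nil_append, zero_add]
  rw [show (PySem.List.pyRange 0 (totLen words) 1)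
        = (PySem.List.pyRange 0 (0 + totLen words) 1) by rw [zero_add]]
  exact (A_flat words hpre).trans
    (scan words hpre 0 (startsOf 0 words) (endsOf 0 words)
      (fun i _ => Iff.rfl) (fun i _ => Iff.rfl)).symm
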